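/-
  SEGMENT C2 OF `start_decoder` (the head of the codebook loop: `i < count`?, the sync pattern, `dimensions`, `entries`, `ordered`,
  `sparse`, FIX 6, the allocation of `lengths`, the dispatch on `ordered`; stb_vorbis_fixed.c:3746–3773, 0x114298 … 0x114410 +
  0x114439 … 0x1144e9, 129 instructions), SPLIT IN FOUR at the return of `ordered = get_bits(f, 1)` (`Vorbis.L.start_decoder.cut90`,
  0x1143aa) and at the returns of the two allocators (`cut91`, 0x1143f8: `setup_temp_malloc`, the sparse book; `cut99`, 0x1144c2:
  `setup_malloc`, the dense book). THE CUTS ARE THE FARM WORKER'S (attempt 1 of start_decoder.C2 proved the stretch up to `cut90` and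
  proposed exactly these children); the assertions are its `In3` restated with the tree's families `Frame` + `Cur`.

      StartDecoder.InC2b / AtC2b    the assertion at 0x1143aa: `Frame` + CUR(i) with `Ai` = the current arena, no temp block, the book
                                    fresh but for `dimensions`, `entries` (bounds of K1 without FIX 6), `eax = ordered < 2`
      StartDecoder.InC2c / AtC2c    the assertion at 0x1143f8 (sparse): K1, `sparse = 1`, `r12 = 0`, rax = NULL or the temp block P1
      StartDecoder.InC2d / AtC2d    the assertion at 0x1144c2 (dense): K1, `sparse = 0`, `r12 = ordered < 2`, no temp block,
                                    rax = NULL or a block of `entries` bytes allocated since `Ai`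
      StartDecoder.SegC2a           0x114298 → 0x1143aa ∨ `AtC16` ∨ ERR   (79 instructions; the worker's `to_cut90`)
      StartDecoder.SegC2b           0x1143aa → 0x1143f8 ∨ 0x1144c2 ∨ ERR   (33 instructions: `sparse`, FIX 6, one allocator call)
      StartDecoder.SegC2c           0x1143f8 → `AtC4` ∨ ERR                (12 instructions)
      StartDecoder.SegC2d           0x1144c2 → `AtC3` ∨ `AtC4` ∨ ERR       (16 instructions: the store `c->codeword_lengths`)
      StartDecoder.SegC2.of_parts   SegC2a → SegC2b → SegC2c → SegC2d → SegC2   (the claim `SegC2` of StartDecoderA.lean is unchanged)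

  THE AGES. At the head of the iteration the head-of-iteration snapshot `Ai` IS the current arena (`BodyC2.ages`, `Cur.of_sd4`), and
  nothing is allocated before the calls at 0x1143f3 / 0x1144bd: `InC2b` states CUR(i) with `Ai := A.1`. After the allocator the
  ghost arena has grown (`Cur.alloc_call`: `(A.1.pushSetup n, A.1.newSetupObj n :: A.2)`; `Cur.free` with `A.1.extends_pushTemp n`),
  `Ai` stays: the dense block is `Since Ai A'.1` (`ArenaOK.since_pushSetup` of BEFORE the call).
  Registers (callee-saved only survive a cut): `r14 = c` (`Cur.r14`), `r12 = ordered` from 0x1143aa on; `rbx`, `rbp`, `r13`, `r15` are dead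
  at all three cuts (`r15 = f` is not read after 0x1143a2; `bl = sparse` is re-set from rax at 0x1143f8 / 0x1144c2).
  Stack slots: `q[R+18H] = f` (`Cur.slot_f`), `d[R+30H] = i` (`Cur.slot_i`), `b[R+10H] = 0` (Z10, `Cur.sd.frame`: the `sparse` of an
  ordered book, read 0x1143b5).
-/
import Vorbis.LabelsAt
import Vorbis.Spec.StartDecoderA
import Vorbis.Spec.StartDecoderCarry
namespace Vorbis.Spec.StartDecoder
open X86 X86.User Asan

/-- **`AtC2b i`, 0x1143aa** (`cut90`, the return of `ordered = get_bits(f, 1)`; exit of `C2a`, entry of `C2b`): `Frame` ∧ CUR(i) whose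
head-of-iteration snapshot is the CURRENT arena (nothing has been allocated in this iteration) ∧ no temp block ∧ the book `c = cb(i)`
holds `dimensions` (stored 0x114351: two zero-extended bytes) and `entries` (stored 0x114399: three zero-extended bytes) and is
otherwise as the zero fill left it (`fresh`, `cl0`, and `sparse`, which 0x1143c3 overwrites before anything reads it) ∧
`eax = ordered ∈ {0, 1}` (read 0x1143aa `mov r12d,eax ; test eax,eax`). -/
structure InC2b (u₀ : State) (g : Ghost) (i : Nat) (A2 A3 : Arena) (A : Arena × List Obj) (v : State) : Prop where
  frame : Frame u₀ g L.start_decoder.cut90 A v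
  /-- CUR(i); the snapshot `Ai` is the arena of this point -/
  cur : Cur g i A2 A3 A.1 A v
  /-- no temp block is outstanding at the head of an iteration (`SD4`'s `temps = []`); nothing was allocated since -/
  noTemps : A.1.temps = []
  /-- the seven fields nothing in C2 writes (from ZF(i) of the entry) -/
  fresh : Fresh7 v.mem (g.cb v.mem i)
  /-- `codeword_lengths` is still NULL (written only at 0x1144ce, in `C2d`) -/
  cl0 : Codebook.codeword_lengths v.mem (g.cb v.mem i) = 0
  /-- `dimensions` = two zero-extended bytes (FIX 6, `dimensions ≠ 0`, is tested in `C2b`) -/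
  dim_nonneg : 0 ≤ Codebook.dimensions v.mem (g.cb v.mem i)
  dim_le : Codebook.dimensions v.mem (g.cb v.mem i) ≤ 65535
  /-- `entries` = three zero-extended bytes -/
  ent_nonneg : 0 ≤ Codebook.entries v.mem (g.cb v.mem i)
  ent_lt : Codebook.entries v.mem (g.cb v.mem i) < 16777216
  /-- `ordered`: one bit (`GetBitsResult 1`) -/
  rax : (v.reg .rax).toNat < 2

/-- `AtC2b i`: `InC2b` for some ghost arena and ghost snapshots. -/
def AtC2b (u₀ : State) (g : Ghost) (i : Nat) (v : State) : Prop := ∃ A A2 A3, InC2b u₀ g i A2 A3 A v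

/-- **`AtC2c i`, 0x1143f8** (`cut91`, the return of `setup_temp_malloc(f, c->entries)`, the SPARSE book; exit of `C2b`, entry of
`C2c`): `Frame` ∧ CUR(i) over the ghost arena `A` AFTER the call ∧ K1 (FIX 6 passed at 0x1143cf) ∧ `sparse = 1` (stored 0x1143c3) ∧
`r12 = ordered = 0` (a sparse book is unordered: an ordered book takes the 0 of Z10; read 0x114404, 0x11440d) ∧ the book otherwise
fresh ∧ the allocator's result: `rax = NULL` (the ghost is the one of before the call), or `rax` = the temp block P1 of `entries`
bytes, the ONLY temp block (`temps = []` before the call, `pushTemp`). -/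
structure InC2c (u₀ : State) (g : Ghost) (i : Nat) (A2 A3 Ai : Arena) (A : Arena × List Obj) (v : State) : Prop where
  frame : Frame u₀ g L.start_decoder.cut91 A v
  cur : Cur g i A2 A3 Ai A v
  k1 : Codebook.K1 v.mem (g.cb v.mem i)
  fresh : Fresh7 v.mem (g.cb v.mem i)
  cl0 : Codebook.codeword_lengths v.mem (g.cb v.mem i) = 0
  sparse1 : Codebook.sparse v.mem (g.cb v.mem i) = 1
  /-- `ordered = 0` (the whole register: `mov r12d,eax` zero-extends) -/
  r12 : v.reg .r12 = addr 0
  /-- the result of `setup_temp_malloc(f, entries)` -/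
  res : v.reg .rax = 0 ∨
    TempsAre A.1 [((v.reg .rax).toNat, (Codebook.entries v.mem (g.cb v.mem i)).toNat)]

/-- `AtC2c i`: `InC2c` for some ghost arena and ghost snapshots. -/
def AtC2c (u₀ : State) (g : Ghost) (i : Nat) (v : State) : Prop := ∃ A A2 A3 Ai, InC2c u₀ g i A2 A3 Ai A v

/-- **`AtC2d i`, 0x1144c2** (`cut99`, the return of `setup_malloc(f, c->entries)`, the DENSE book; exit of `C2b`, entry of `C2d`):
`Frame` ∧ CUR(i) over the ghost arena `A` AFTER the call ∧ K1 ∧ `sparse = 0` ∧ `r12 = ordered ∈ {0, 1}` (read 0x114404) ∧ no temp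
block ∧ the book otherwise fresh, `codeword_lengths` still NULL (the store 0x1144ce is in `C2d`) ∧ the allocator's result:
`rax = NULL`, or `rax` = a block of `entries` bytes allocated since `Ai` (= the arena before the call). -/
structure InC2d (u₀ : State) (g : Ghost) (i : Nat) (A2 A3 Ai : Arena) (A : Arena × List Obj) (v : State) : Prop where
  frame : Frame u₀ g L.start_decoder.cut99 A v
  cur : Cur g i A2 A3 Ai A v
  k1 : Codebook.K1 v.mem (g.cb v.mem i)
  fresh : Fresh7 v.mem (g.cb v.mem i)
  cl0 : Codebook.codeword_lengths v.mem (g.cb v.mem i) = 0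
  sparse0 : Codebook.sparse v.mem (g.cb v.mem i) = 0
  /-- `ordered`: 0 → `AtC4`, 1 → `AtC3` -/
  r12 : (v.reg .r12).toNat < 2
  noTemps : A.1.temps = []
  /-- the result of `setup_malloc(f, entries)` -/
  res : v.reg .rax = 0 ∨
    Since Ai A.1 ⟨(v.reg .rax).toNat, (Codebook.entries v.mem (g.cb v.mem i)).toNat⟩

/-- `AtC2d i`: `InC2d` for some ghost arena and ghost snapshots. -/
def AtC2d (u₀ : State) (g : Ghost) (i : Nat) (v : State) : Prop := ∃ A A2 A3 Ai, InC2d u₀ g i A2 A3 Ai A v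

/-! ### The claims of the children -/

/-- **Segment `start_decoder.C2a`** (0x114298 … 0x1143a5 + the three sync stubs 0x114439 … 0x114479, 79 instructions: the loop test
`i < count` (→ `AtC16`), `c = codebooks + i`, the sync bytes 'B' 'C' 'V' (three `get_bits(f, 8)`, three ERRSTUBs), `dimensions` (two
`get_bits(f, 8)`, the checked store 0x114351), `entries` (three `get_bits(f, 8)`, the checked store 0x114399), `ordered =
get_bits(f, 1)`): from the head of the iteration to the return of the last reader call. -/
def SegC2a (Lay : Layout) (μ : Microarch) (u₀ : State) : Prop :=
  ∀ (g : Ghost) (i : Nat) (v : State), AtC2 u₀ g i v →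
    ReachVia Lay μ WayInv v (fun w => AtC16 u₀ g w ∨ AtERR u₀ g w ∨ AtC2b u₀ g i w)

/-- **Segment `start_decoder.C2b`** (0x1143aa … 0x1143f3 + 0x11447e … 0x11448f + the FIX 6 stub 0x114494 … 0x1144a6 + 0x1144ab …
0x1144bd, 33 instructions: `sparse = ordered ? 0 : get_bits(f, 1)` (the 0 is byte `[R+10H]`: Z10), the checked store `c->sparse`,
FIX 6 `dimensions == 0` → ERRSTUB(20), `setup_temp_malloc(f, entries)` (sparse) / `setup_malloc(f, entries)` (dense)): from the
return of `ordered` to the return of the allocator. -/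
def SegC2b (Lay : Layout) (μ : Microarch) (u₀ : State) : Prop :=
  ∀ (g : Ghost) (i : Nat) (v : State), AtC2b u₀ g i v →
    ReachVia Lay μ WayInv v (fun w => AtERR u₀ g w ∨ AtC2c u₀ g i w ∨ AtC2d u₀ g i w)

/-- **Segment `start_decoder.C2c`** (0x1143f8 … 0x114410 + the outofmem stub 0x1144d7 … 0x1144e9, 12 instructions: `lengths = rax`,
NULL → ERRSTUB(3); `test r12d,r12d ; jne` is not taken (`r12 = 0`); `total = 0`): the sparse book, to the head of loop 3786 with
`j = 0`. -/
def SegC2c (Lay : Layout) (μ : Microarch) (u₀ : State) : Prop :=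
  ∀ (g : Ghost) (i : Nat) (v : State), AtC2c u₀ g i v →
    ReachVia Lay μ WayInv v (fun w => AtC4 u₀ g i w ∨ AtERR u₀ g w)

/-- **Segment `start_decoder.C2d`** (0x1144c2 … 0x1144d2 + 0x1143fb … 0x114410 + the outofmem stub 0x1144d7 … 0x1144e9, 16
instructions: the checked store `c->codeword_lengths = lengths = rax`, NULL → ERRSTUB(3); `ordered ≠ 0` → `AtC3`, else
`total = 0` → `AtC4`): the dense book. -/
def SegC2d (Lay : Layout) (μ : Microarch) (u₀ : State) : Prop :=
  ∀ (g : Ghost) (i : Nat) (v : State), AtC2d u₀ g i v →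
    ReachVia Lay μ WayInv v (fun w => AtC3 u₀ g i w ∨ AtC4 u₀ g i w ∨ AtERR u₀ g w)

/-- **Segment C2 from its four parts**: a plain chain, no loop (the loop over `i` is the composition's). -/
theorem SegC2.of_parts {Lay : Layout} {μ : Microarch} {u₀ : State} (ha : SegC2a Lay μ u₀) (hb : SegC2b Lay μ u₀)
    (hc : SegC2c Lay μ u₀) (hd : SegC2d Lay μ u₀) : SegC2 Lay μ u₀ := by
  intro g i v hat
  refine (ha g i v hat).trans ?_
  intro v1 h1
  rcases h1 with h16 | herr | h2b
  · exact ReachVia.done (Or.inr (Or.inr (Or.inl h16)))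
  · exact ReachVia.done (Or.inr (Or.inr (Or.inr herr)))
  refine (hb g i v1 h2b).trans ?_
  intro v2 h2
  rcases h2 with herr | h2c | h2d
  · exact ReachVia.done (Or.inr (Or.inr (Or.inr herr)))
  · refine (hc g i v2 h2c).mono ?_
    intro w hw
    rcases hw with h4 | herr
    · exact Or.inr (Or.inl h4)
    · exact Or.inr (Or.inr (Or.inr herr))
  · refine (hd g i v2 h2d).mono ?_
    intro w hw
    rcases hw with h3 | h4 | herr
    · exact Or.inl h3
    · exact Or.inr (Or.inl h4)
    · exact Or.inr (Or.inr (Or.inr herr))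

end Vorbis.Spec.StartDecoder
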